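-- pv_equiv track=rewrite | github.com/andyvauliln/Property-Administration | mysite/views/payment_sync_v2.py | _best_keyword_hit
-- ===== SOURCE A (Python) =====
-- def _best_keyword_hit(candidates, desc_lower):
--     """
--     candidates: iterable of tuples (obj, keywords_list, name_string)
--     returns best obj or None using (hit_count, longest_hit)
--     """
--     best_obj = None
--     best_hits = 0
--     best_longest = 0
--     for obj, kws, _name in candidates:
--         hits = [kw for kw in kws if kw and kw in desc_lower]
--         if not hits:
--             continue
--         longest = max(len(h) for h in hits)
--         if len(hits) > best_hits or (len(hits) == best_hits and longest > best_longest):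
--             best_obj = obj
--             best_hits = len(hits)
--             best_longest = longest
--     return best_obj
-- ===== SOURCE B (Python) =====
-- def _best_keyword_hit(candidates, desc_lower):
--     # decorate-sort-undecorate: score each candidate with counters, tag it with
--     # negated score and its position, sort, and take the head (the first best).
--     scored = []
--     for i, (obj, kws, _name) in enumerate(candidates):
--         n = 0
--         longest = 0
--         for kw in kws:
--             if kw and kw in desc_lower:
--                 n += 1
--                 if len(kw) > longest:
--                     longest = len(kw)
--         if n:
--             scored.append((-n, -longest, i, obj))
--     if not scored:
--         return None
--     scored.sort()
--     return scored[0][3]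
-- ===== Notes on version B (the rewrite author's own statement) =====
-- stated objective: alternative
-- what changed: Replaces the single-pass running-best bookkeeping with decorate-sort-undecorate: each candidate is scored by two counters (no hits list / max call), tagged with (-hits, -longest, index), the tagged list is sorted and the head taken; the index tag makes the sort reproduce A's first-wins tie-break.
import Mathlib
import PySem

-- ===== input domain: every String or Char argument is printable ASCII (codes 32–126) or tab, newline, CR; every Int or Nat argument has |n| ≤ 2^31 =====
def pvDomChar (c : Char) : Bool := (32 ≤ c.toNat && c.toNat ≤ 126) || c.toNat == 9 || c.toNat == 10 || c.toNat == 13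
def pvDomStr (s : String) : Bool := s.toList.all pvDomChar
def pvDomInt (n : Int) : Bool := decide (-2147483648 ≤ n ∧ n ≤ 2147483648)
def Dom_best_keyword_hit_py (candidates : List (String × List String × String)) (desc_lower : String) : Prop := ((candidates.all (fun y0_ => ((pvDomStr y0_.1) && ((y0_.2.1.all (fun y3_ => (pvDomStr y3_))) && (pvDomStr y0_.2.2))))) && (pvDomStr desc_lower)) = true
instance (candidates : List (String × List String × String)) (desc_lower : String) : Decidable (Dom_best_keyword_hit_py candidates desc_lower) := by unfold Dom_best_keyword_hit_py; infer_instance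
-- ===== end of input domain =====

-- B replaces A's running-best bookkeeping with decorate-sort-undecorate (score by counters,
-- tag with negated score and position, sort, take the head); same result, different algorithm.

-- ===== PORT A =====
-- literal transliteration of A's loop: state (best_obj, best_hits, best_longest);
-- `max(len(h) for h in hits)` is guarded by the nonempty check, so `.getD 0` is unreachable.
def best_keyword_hit_py (candidates : List (String × List String × String)) (desc_lower : String) : Option String :=
  (candidates.foldl (fun (st : Option String × Int × Int) c =>
      match c with
      | (obj, kws, _name) =>
        let hits := kws.filter (fun kw => !(kw == "") && PySem.Str.isIn kw desc_lower)
        if hits.isEmpty then st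
        else
          let longest := (PySem.List.max? (hits.map PySem.Str.len) (fun x => x)).getD 0
          if (hits.length : Int) > st.2.1 ∨ ((hits.length : Int) = st.2.1 ∧ longest > st.2.2) then
            (some obj, (hits.length : Int), longest)
          else st)
    (none, 0, 0)).1

-- ===== PORT B =====
-- B's inner scoring loop: two counters n (hit count) and longest, updated per keyword.
def pvScoreB (desc : String) (kws : List String) : Int × Int :=
  kws.foldl (fun (st : Int × Int) kw =>
    if (!(kw == "") && PySem.Str.isIn kw desc) = true then
      (st.1 + 1, if PySem.Str.len kw > st.2 then PySem.Str.len kw else st.2)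
    else st) (0, 0)

-- Python's tuple '<' on (int, int, int, str) is lexicographic: exactly the ×ₗ order.
def pvLexKey (e : Int × Int × Int × String) : Int ×ₗ Int ×ₗ Int ×ₗ String :=
  toLex (e.1, toLex (e.2.1, toLex (e.2.2.1, e.2.2.2)))

def pvLexLt (a b : Int × Int × Int × String) : Bool := decide (pvLexKey a < pvLexKey b)

-- scored.sort(): a stable sort under the tuple order, hand-ported as insertion sort
-- (exact: stable sorts of the same list under the same total preorder coincide).
def pvInsertLex (x : Int × Int × Int × String) :
    List (Int × Int × Int × String) → List (Int × Int × Int × String)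
  | [] => [x]
  | y :: ys => if pvLexLt x y then x :: y :: ys else y :: pvInsertLex x ys

def pvSortLex (xs : List (Int × Int × Int × String)) : List (Int × Int × Int × String) :=
  xs.foldl (fun acc x => pvInsertLex x acc) []

def best_keyword_hit_py_alt (candidates : List (String × List String × String)) (desc_lower : String) : Option String :=
  let scored := (PySem.List.enumerate candidates 0).foldl
    (fun (acc : List (Int × Int × Int × String)) p =>
      let s := pvScoreB desc_lower p.2.2.1
      if s.1 ≠ 0 then acc ++ [(-s.1, -s.2, p.1, p.2.1)] else acc) []
  match pvSortLex scored with
  | [] => none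
  | h :: _ => some h.2.2.2

-- ===== PRECONDITION & SPEC =====
def Spec_best_keyword_hit_py (candidates : List (String × List String × String)) (desc_lower : String) (out : Option String) : Prop := out = best_keyword_hit_py_alt candidates desc_lower
instance (candidates : List (String × List String × String)) (desc_lower : String) (out : Option String) : Decidable (Spec_best_keyword_hit_py candidates desc_lower out) := by unfold Spec_best_keyword_hit_py; infer_instance

-- ===== CLAIM (what is proved, stated in full; the proofs are below) =====
def Claim_equal_best_keyword_hit_py : Prop := ∀ (candidates : List (String × List String × String)) (desc_lower : String), Dom_best_keyword_hit_py candidates desc_lower → Spec_best_keyword_hit_py candidates desc_lower (best_keyword_hit_py candidates desc_lower)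

-- ===== LEMMAS AND PROOFS =====

-- the scored list, described recursively (proof-side middle ground between the two ports)
def pvScored (desc : String) : List (String × List String × String) → Int →
    List (Int × Int × Int × String)
  | [], _ => []
  | c :: cs, i =>
    (if (pvScoreB desc c.2.1).1 ≠ 0 then
        [(-(pvScoreB desc c.2.1).1, -(pvScoreB desc c.2.1).2, i, c.1)]
      else []) ++ pvScored desc cs (i + 1)

-- running minimum under pvLexLt (later elements replace only on strict <)
def pvRunMin (acc : Option (Int × Int × Int × String))
    (S : List (Int × Int × Int × String)) : Option (Int × Int × Int × String) :=
  S.foldl (fun a x =>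
    match a with
    | none => some x
    | some m => if pvLexLt x m then some x else some m) acc

def pvConv : Option (Int × Int × Int × String) → Option String × Int × Int
  | none => (none, 0, 0)
  | some (a, b, _, o) => (some o, -a, -b)

theorem pvLexKey_inj {a b : Int × Int × Int × String} (h : pvLexKey a = pvLexKey b) : a = b := by
  rcases a with ⟨a1, a2, a3, a4⟩; rcases b with ⟨b1, b2, b3, b4⟩
  simp only [pvLexKey, toLex_inj, Prod.mk.injEq] at h
  simp [h.1, h.2.1, h.2.2.1, h.2.2.2]

theorem pvScoreB_state (desc : String) (kws : List String) (n m : Int) :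
    kws.foldl (fun (st : Int × Int) kw =>
      if (!(kw == "") && PySem.Str.isIn kw desc) = true then
        (st.1 + 1, if PySem.Str.len kw > st.2 then PySem.Str.len kw else st.2)
      else st) (n, m) =
    (n + ((kws.filter (fun kw => !(kw == "") && PySem.Str.isIn kw desc)).length : Int),
     ((kws.filter (fun kw => !(kw == "") && PySem.Str.isIn kw desc)).map PySem.Str.len).foldl
       (fun acc l => if l > acc then l else acc) m) := by
  induction kws generalizing n m with
  | nil => simp
  | cons kw t ih =>
    simp only [List.foldl_cons, List.filter_cons]
    by_cases hp : (!(kw == "") && PySem.Str.isIn kw desc) = true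
    · rw [if_pos hp, if_pos hp, ih]
      simp only [List.map_cons, List.length_cons, List.foldl_cons, Prod.mk.injEq]
      refine ⟨by push_cast; ring, trivial⟩
    · rw [if_neg hp, if_neg hp, ih]

theorem pvScoreB_char (desc : String) (kws : List String) :
    pvScoreB desc kws =
      (((kws.filter (fun kw => !(kw == "") && PySem.Str.isIn kw desc)).length : Int),
       ((kws.filter (fun kw => !(kw == "") && PySem.Str.isIn kw desc)).map PySem.Str.len).foldl
         (fun acc l => if l > acc then l else acc) 0) := by
  unfold pvScoreB
  rw [pvScoreB_state]
  norm_num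

theorem pvScoreB_fst_nonneg (desc : String) (kws : List String) :
    0 ≤ (pvScoreB desc kws).1 := by
  rw [pvScoreB_char]
  positivity

theorem pvIfGt_eq_max (m l : Int) : (if l > m then l else m) = max m l := by
  rw [max_def]; split_ifs <;> omega

theorem pvFoldIf_eq_foldMax (ls : List Int) (m : Int) :
    ls.foldl (fun acc l => if l > acc then l else acc) m = ls.foldl max m := by
  induction ls generalizing m with
  | nil => rfl
  | cons a t ih => simp only [List.foldl_cons, pvIfGt_eq_max]

-- A's loop body rewritten through B's score
theorem pvStepA_eq (desc : String) (st : Option String × Int × Int)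
    (c : String × List String × String) :
    (match c with
      | (obj, kws, _name) =>
        let hits := kws.filter (fun kw => !(kw == "") && PySem.Str.isIn kw desc)
        if hits.isEmpty then st
        else
          let longest := (PySem.List.max? (hits.map PySem.Str.len) (fun x => x)).getD 0
          if (hits.length : Int) > st.2.1 ∨ ((hits.length : Int) = st.2.1 ∧ longest > st.2.2) then
            (some obj, (hits.length : Int), longest)
          else st) =
    (if (pvScoreB desc c.2.1).1 = 0 then st
     else if (pvScoreB desc c.2.1).1 > st.2.1 ∨
         ((pvScoreB desc c.2.1).1 = st.2.1 ∧ (pvScoreB desc c.2.1).2 > st.2.2) then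
       (some c.1, (pvScoreB desc c.2.1).1, (pvScoreB desc c.2.1).2)
     else st) := by
  rcases c with ⟨obj, kws, name⟩
  have hs := pvScoreB_char desc kws
  rcases hl : kws.filter (fun kw => !(kw == "") && PySem.Str.isIn kw desc) with _ | ⟨a, t⟩
  · rw [hl] at hs
    simp only [List.length_nil, Nat.cast_zero, List.map_nil, List.foldl_nil] at hs
    simp only [hl, List.isEmpty_nil]
    rw [if_pos trivial, hs]
    norm_num
  · rw [hl] at hs
    have hlen : (0:Int) ≤ PySem.Str.len a := by
      rw [PySem.Str.len_eq]; positivity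
    have hmax : ((a :: t).map PySem.Str.len).foldl (fun acc l => if l > acc then l else acc) 0
        = (t.map PySem.Str.len).foldl max (PySem.Str.len a) := by
      rw [pvFoldIf_eq_foldMax]
      simp only [List.map_cons, List.foldl_cons, max_eq_right hlen]
    rw [hmax] at hs
    simp only [hl, hs, List.isEmpty_cons, Bool.false_eq_true, if_false, List.map_cons,
      PySem.List.max?_id_cons, Option.getD_some, List.length_cons]
    rw [if_neg (by omega : ¬(((t.length + 1 : Nat) : Int) = 0))]

-- A's fold is the running lexicographic minimum over the scored list
theorem pvA_loop (desc : String) (cs : List (String × List String × String)) (i0 : Int)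
    (acc : Option (Int × Int × Int × String))
    (hinv : ∀ e, acc = some e → e.2.2.1 < i0) :
    cs.foldl (fun (st : Option String × Int × Int) c =>
      match c with
      | (obj, kws, _name) =>
        let hits := kws.filter (fun kw => !(kw == "") && PySem.Str.isIn kw desc)
        if hits.isEmpty then st
        else
          let longest := (PySem.List.max? (hits.map PySem.Str.len) (fun x => x)).getD 0
          if (hits.length : Int) > st.2.1 ∨ ((hits.length : Int) = st.2.1 ∧ longest > st.2.2) then
            (some obj, (hits.length : Int), longest)
          else st) (pvConv acc) =
    pvConv (pvRunMin acc (pvScored desc cs i0)) := by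
  induction cs generalizing i0 acc with
  | nil => rfl
  | cons c cs ih =>
    rw [List.foldl_cons, pvStepA_eq]
    by_cases h0 : (pvScoreB desc c.2.1).1 = 0
    · rw [if_pos h0]
      simp only [pvScored, h0, ne_eq, not_true_eq_false, if_false, List.nil_append]
      exact ih (i0 + 1) acc (fun e he => by have := hinv e he; omega)
    · rw [if_neg h0]
      simp only [pvScored, h0, ne_eq, not_false_eq_true, if_true, List.cons_append,
        List.nil_append, pvRunMin, List.foldl_cons]
      rcases acc with _ | ⟨ma, mb, mi, mo⟩
      · simp only [pvConv]
        have hcond : (pvScoreB desc c.2.1).1 > (0:Int) ∨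
            ((pvScoreB desc c.2.1).1 = (0:Int) ∧ (pvScoreB desc c.2.1).2 > 0) := by
          have := pvScoreB_fst_nonneg desc c.2.1
          omega
        rw [if_pos hcond]
        have hc2 : (some c.1, (pvScoreB desc c.2.1).1, (pvScoreB desc c.2.1).2) =
            pvConv (some (-(pvScoreB desc c.2.1).1, -(pvScoreB desc c.2.1).2, i0, c.1)) := by
          simp [pvConv]
        rw [hc2]
        exact ih (i0 + 1)
          (some (-(pvScoreB desc c.2.1).1, -(pvScoreB desc c.2.1).2, i0, c.1))
          (fun e he => by rw [← Option.some_inj.mp he]; show i0 < i0 + 1; omega)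
      · have hmi : mi < i0 := by simpa using hinv (ma, mb, mi, mo) rfl
        simp only [pvConv]
        have hlt : pvLexLt (-(pvScoreB desc c.2.1).1, -(pvScoreB desc c.2.1).2, i0, c.1)
            (ma, mb, mi, mo) = true ↔
            ((pvScoreB desc c.2.1).1 > -ma ∨
              ((pvScoreB desc c.2.1).1 = -ma ∧ (pvScoreB desc c.2.1).2 > -mb)) := by
          simp only [pvLexLt, pvLexKey, decide_eq_true_eq, Prod.Lex.lt_iff, ofLex_toLex]
          constructor
          · rintro (h | ⟨h1, h | ⟨h2, h | ⟨h3, _⟩⟩⟩) <;> omega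
          · rintro (h | ⟨h1, h2⟩)
            · left; omega
            · right; exact ⟨by omega, Or.inl (by omega)⟩
        by_cases hc : (pvScoreB desc c.2.1).1 > -ma ∨
            ((pvScoreB desc c.2.1).1 = -ma ∧ (pvScoreB desc c.2.1).2 > -mb)
        · rw [if_pos (by simpa using hc), if_pos (hlt.mpr hc)]
          have hc2 : (some c.1, (pvScoreB desc c.2.1).1, (pvScoreB desc c.2.1).2) =
              pvConv (some (-(pvScoreB desc c.2.1).1, -(pvScoreB desc c.2.1).2, i0, c.1)) := by
            simp [pvConv]
          rw [hc2]
          exact ih (i0 + 1)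
            (some (-(pvScoreB desc c.2.1).1, -(pvScoreB desc c.2.1).2, i0, c.1))
            (fun e he => by rw [← Option.some_inj.mp he]; show i0 < i0 + 1; omega)
        · rw [if_neg (by simpa using hc), if_neg (by simpa [hlt] using hc)]
          have hc3 : (some mo, -ma, -mb) = pvConv (some (ma, mb, mi, mo)) := rfl
          rw [hc3]
          exact ih (i0 + 1) (some (ma, mb, mi, mo))
            (fun e he => by rw [← Option.some_inj.mp he]; show mi < i0 + 1; omega)

-- B's builder loop produces pvScored
theorem pvB_build (desc : String) (cs : List (String × List String × String)) (i0 : Int)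
    (acc : List (Int × Int × Int × String)) :
    (PySem.List.enumerate cs i0).foldl
      (fun (a : List (Int × Int × Int × String)) p =>
        let s := pvScoreB desc p.2.2.1
        if s.1 ≠ 0 then a ++ [(-s.1, -s.2, p.1, p.2.1)] else a) acc =
    acc ++ pvScored desc cs i0 := by
  induction cs generalizing i0 acc with
  | nil => simp [PySem.List.enumerate_nil, pvScored]
  | cons c cs ih =>
    rw [PySem.List.enumerate_cons, List.foldl_cons]
    by_cases h0 : (pvScoreB desc c.2.1).1 = 0
    · simp only [pvScored, h0, ne_eq, not_true_eq_false, if_false, List.nil_append]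
      exact ih (i0 + 1) acc
    · simp only [pvScored, h0, ne_eq, not_false_eq_true, if_true, ih (i0 + 1),
        List.cons_append, List.nil_append, List.append_assoc]

theorem pvInsertLex_perm (x : Int × Int × Int × String) (ys : List (Int × Int × Int × String)) :
    (pvInsertLex x ys).Perm (x :: ys) := by
  induction ys with
  | nil => simp [pvInsertLex]
  | cons y ys ih =>
    simp only [pvInsertLex]
    by_cases h : pvLexLt x y = true
    · rw [if_pos h]
    · rw [if_neg h]
      exact (ih.cons y).trans (List.Perm.swap x y ys)

theorem pvSortLex_aux_perm (xs acc : List (Int × Int × Int × String)) :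
    (xs.foldl (fun a x => pvInsertLex x a) acc).Perm (acc ++ xs) := by
  induction xs generalizing acc with
  | nil => simp
  | cons x xs ih =>
    rw [List.foldl_cons]
    exact (ih (pvInsertLex x acc)).trans
      (((pvInsertLex_perm x acc).append_right xs).trans List.perm_middle.symm)

theorem pvSortLex_perm (xs : List (Int × Int × Int × String)) : (pvSortLex xs).Perm xs := by
  simpa using pvSortLex_aux_perm xs []

theorem pvInsertLex_pairwise (x : Int × Int × Int × String)
    (ys : List (Int × Int × Int × String))
    (h : ys.Pairwise (fun a b => pvLexKey a ≤ pvLexKey b)) :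
    (pvInsertLex x ys).Pairwise (fun a b => pvLexKey a ≤ pvLexKey b) := by
  induction ys with
  | nil => simp [pvInsertLex]
  | cons y ys ih =>
    rcases List.pairwise_cons.mp h with ⟨hy, hys⟩
    simp only [pvInsertLex]
    by_cases hlt : pvLexLt x y = true
    · rw [if_pos hlt]
      have hxy : pvLexKey x ≤ pvLexKey y :=
        le_of_lt (by simpa [pvLexLt, decide_eq_true_eq] using hlt)
      refine List.pairwise_cons.mpr ⟨?_, h⟩
      intro z hz
      rcases List.mem_cons.mp hz with rfl | hz2
      · exact hxy
      · exact hxy.trans (hy z hz2)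
    · rw [if_neg hlt]
      have hyx : pvLexKey y ≤ pvLexKey x :=
        not_lt.mp (by simpa [pvLexLt, decide_eq_true_eq] using hlt)
      refine List.pairwise_cons.mpr ⟨?_, ih hys⟩
      intro z hz
      rcases List.mem_cons.mp ((pvInsertLex_perm x ys).mem_iff.mp hz) with rfl | hz2
      · exact hyx
      · exact hy z hz2

theorem pvSortLex_aux_pairwise (xs acc : List (Int × Int × Int × String))
    (h : acc.Pairwise (fun a b => pvLexKey a ≤ pvLexKey b)) :
    (xs.foldl (fun a x => pvInsertLex x a) acc).Pairwise (fun a b => pvLexKey a ≤ pvLexKey b) := by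
  induction xs generalizing acc with
  | nil => simpa
  | cons x xs ih => exact ih (pvInsertLex x acc) (pvInsertLex_pairwise x acc h)

theorem pvSortLex_pairwise (xs : List (Int × Int × Int × String)) :
    (pvSortLex xs).Pairwise (fun a b => pvLexKey a ≤ pvLexKey b) :=
  pvSortLex_aux_pairwise xs [] List.Pairwise.nil

-- the running minimum is a key-minimal member
theorem pvRunMin_spec (S : List (Int × Int × Int × String)) (m0 : Int × Int × Int × String) :
    ∃ m, pvRunMin (some m0) S = some m ∧ m ∈ m0 :: S ∧
      ∀ y ∈ m0 :: S, pvLexKey m ≤ pvLexKey y := by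
  induction S generalizing m0 with
  | nil =>
    refine ⟨m0, rfl, List.mem_cons.mpr (Or.inl rfl), ?_⟩
    intro y hy
    rcases List.mem_cons.mp hy with rfl | hy2
    · exact le_refl _
    · exact absurd hy2 (List.not_mem_nil)
  | cons x S ih =>
    simp only [pvRunMin, List.foldl_cons]
    by_cases hlt : pvLexLt x m0 = true
    · rw [if_pos hlt]
      have hx : pvLexKey x < pvLexKey m0 := by
        simpa [pvLexLt, decide_eq_true_eq] using hlt
      obtain ⟨m, hm, hmem, hmin⟩ := ih x
      simp only [pvRunMin] at hm
      refine ⟨m, hm, ?_, ?_⟩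
      · rcases List.mem_cons.mp hmem with rfl | hmem2
        · exact List.mem_cons.mpr (Or.inr (List.mem_cons.mpr (Or.inl rfl)))
        · exact List.mem_cons.mpr (Or.inr (List.mem_cons.mpr (Or.inr hmem2)))
      · intro y hy
        rcases List.mem_cons.mp hy with rfl | hy2
        · exact (hmin _ (List.mem_cons.mpr (Or.inl rfl))).trans (le_of_lt hx)
        · exact hmin y hy2
    · rw [if_neg hlt]
      have hx : pvLexKey m0 ≤ pvLexKey x :=
        not_lt.mp (by simpa [pvLexLt, decide_eq_true_eq] using hlt)
      obtain ⟨m, hm, hmem, hmin⟩ := ih m0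
      simp only [pvRunMin] at hm
      refine ⟨m, hm, ?_, ?_⟩
      · rcases List.mem_cons.mp hmem with rfl | hmem2
        · exact List.mem_cons.mpr (Or.inl rfl)
        · exact List.mem_cons.mpr (Or.inr (List.mem_cons.mpr (Or.inr hmem2)))
      · intro y hy
        rcases List.mem_cons.mp hy with rfl | hy2
        · exact hmin _ (List.mem_cons.mpr (Or.inl rfl))
        · rcases List.mem_cons.mp hy2 with rfl | hy3
          · exact (hmin _ (List.mem_cons.mpr (Or.inl rfl))).trans hx
          · exact hmin y (List.mem_cons.mpr (Or.inr hy3))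

-- ===== VERDICT (by name: the statement is the Claim_ definition above) =====
theorem best_keyword_hit_py_spec : Claim_equal_best_keyword_hit_py := by
  intro candidates desc _
  unfold Spec_best_keyword_hit_py best_keyword_hit_py best_keyword_hit_py_alt
  rw [pvB_build desc candidates 0 []]
  rw [show ((none, 0, 0) : Option String × Int × Int) = pvConv none from rfl,
    pvA_loop desc candidates 0 none (by simp)]
  simp only [List.nil_append]
  rcases hS : pvScored desc candidates 0 with _ | ⟨x, S'⟩
  · rfl
  · obtain ⟨m, hm, hmem, hmin⟩ := pvRunMin_spec S' x
    have hA : pvRunMin none (x :: S') = some m := by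
      simpa [pvRunMin, List.foldl_cons] using hm
    rw [hA]
    rcases hsort : pvSortLex (x :: S') with _ | ⟨h, t⟩
    · exfalso
      have hp := pvSortLex_perm (x :: S')
      rw [hsort] at hp
      simp at hp
    · have hperm := pvSortLex_perm (x :: S')
      rw [hsort] at hperm
      have hh_mem : h ∈ x :: S' := hperm.mem_iff.mp (List.mem_cons.mpr (Or.inl rfl))
      have hh_min : ∀ y ∈ x :: S', pvLexKey h ≤ pvLexKey y := by
        intro y hy
        rcases List.mem_cons.mp (hperm.mem_iff.mpr hy) with rfl | hy2
        · exact le_refl _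
        · have hpw := pvSortLex_pairwise (x :: S')
          rw [hsort] at hpw
          exact (List.pairwise_cons.mp hpw).1 y hy2
      have hmh : m = h :=
        pvLexKey_inj (le_antisymm (hmin h hh_mem) (hh_min m hmem))
      rcases m with ⟨a, b, i, o⟩
      simp only [pvConv]
      rw [← hmh]
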